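-- pv_equiv track=rewrite | github.com/Legomanalec/mutab | Sandbox/MidiToTabOptions.py | convert_array_to_tab
-- ===== SOURCE A (Python) =====
-- def convert_array_to_tab(tab_array):
--     strings = ['e', 'B', 'G', 'D', 'A', 'E']
--     tab_string = ''
--     for string in strings:
--         tab_string += string + '|'
--         for i in range(len(tab_array)):
--             if string in tab_array[i]:
--                 tab_string += tab_array[i][1:] + '-' if int(tab_array[i][1:]) > 9 else tab_array[i][1:] + '--'
--             else:
--                 tab_string += '---'
--         tab_string += '\n'
--     return tab_string
-- ===== SOURCE B (Python) =====
-- def convert_array_to_tab(tab_array):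
--     letters = ['e', 'B', 'G', 'D', 'A', 'E']
--     rows = [[] for _ in letters]
--     for elem in tab_array:
--         fret = elem[1:]
--         for letter, row in zip(letters, rows):
--             row.append((fret + '-' if int(fret) > 9 else fret + '--') if letter in elem else '---')
--     return ''.join(letter + '|' + ''.join(row) + '\n' for letter, row in zip(letters, rows))
-- ===== Notes on version B (the rewrite author's own statement) =====
-- stated objective: alternative
-- what changed: A concatenates one full output line at a time, scanning tab_array once per string (letter-major, 6 repeated scans building a flat string); B makes a single element-major pass that extends a 6-row grid column by column and only at the end joins each row into a line.
import Mathlib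
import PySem

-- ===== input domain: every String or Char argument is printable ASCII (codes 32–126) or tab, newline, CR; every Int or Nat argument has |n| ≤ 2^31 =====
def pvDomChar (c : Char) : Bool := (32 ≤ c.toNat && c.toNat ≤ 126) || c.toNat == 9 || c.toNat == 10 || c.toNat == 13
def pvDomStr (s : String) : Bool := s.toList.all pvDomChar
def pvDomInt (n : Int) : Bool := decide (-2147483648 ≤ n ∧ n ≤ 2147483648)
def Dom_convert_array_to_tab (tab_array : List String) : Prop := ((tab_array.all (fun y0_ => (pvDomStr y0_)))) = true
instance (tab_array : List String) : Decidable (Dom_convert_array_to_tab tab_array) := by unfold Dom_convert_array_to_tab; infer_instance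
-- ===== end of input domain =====

-- B builds a 6-row grid in one element-major pass and joins the rows at the end,
-- instead of A's letter-major string concatenation with six scans of tab_array.

-- ===== PORT A =====
def convert_array_to_tab (tab_array : List String) : String :=
  let strings := ["e", "B", "G", "D", "A", "E"]
  let tab_string := ""
  let tab_string := strings.foldl (fun tab_string string =>
    let tab_string := tab_string ++ string ++ "|"
    let tab_string := (PySem.List.pyRange 0 (PySem.List.len tab_array) 1).foldl
      (fun tab_string i =>
        if PySem.Str.isIn string (PySem.List.pyGetD tab_array i "") then
          tab_string ++
            (if (PySem.Int.ofStr? (PySem.Str.slice (PySem.List.pyGetD tab_array i "") (some 1) none)).getD 0 > 9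
              then PySem.Str.slice (PySem.List.pyGetD tab_array i "") (some 1) none ++ "-"
              else PySem.Str.slice (PySem.List.pyGetD tab_array i "") (some 1) none ++ "--")
        else
          tab_string ++ "---") tab_string
    tab_string ++ "\n") tab_string
  tab_string

-- ===== PORT B =====
def convert_array_to_tab_alt (tab_array : List String) : String :=
  let letters := ["e", "B", "G", "D", "A", "E"]
  let rows : List (List String) := letters.map (fun _ => [])
  let rows := tab_array.foldl (fun rows elem =>
    let fret := PySem.Str.slice elem (some 1) none
    List.zipWith (fun letter row =>
      row ++ [if PySem.Str.isIn letter elem then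
                (if (PySem.Int.ofStr? fret).getD 0 > 9 then fret ++ "-" else fret ++ "--")
              else "---"]) letters rows) rows
  PySem.Str.join "" ((List.zip letters rows).map
    (fun p => p.1 ++ "|" ++ PySem.Str.join "" p.2 ++ "\n"))

-- ===== PRECONDITION & SPEC =====
-- Pre_ excludes exactly the inputs where Python A raises ValueError: an element that
-- contains one of the six string letters but whose tail elem[1:] is not a valid int literal.
def Pre_convert_array_to_tab (tab_array : List String) : Prop :=
  ∀ s ∈ tab_array,
    (PySem.Str.isIn "e" s = true ∨ PySem.Str.isIn "B" s = true ∨ PySem.Str.isIn "G" s = true ∨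
     PySem.Str.isIn "D" s = true ∨ PySem.Str.isIn "A" s = true ∨ PySem.Str.isIn "E" s = true) →
    (PySem.Int.ofStr? (PySem.Str.slice s (some 1) none)).isSome = true
instance (tab_array : List String) : Decidable (Pre_convert_array_to_tab tab_array) := by
  unfold Pre_convert_array_to_tab; infer_instance

def pvWitness_convert_array_to_tab : List String := ["e10", "B3", "x7"]

def Spec_convert_array_to_tab (tab_array : List String) (out : String) : Prop := out = convert_array_to_tab_alt tab_array
instance (tab_array : List String) (out : String) : Decidable (Spec_convert_array_to_tab tab_array out) := by unfold Spec_convert_array_to_tab; infer_instance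

-- ===== CLAIM (what is proved, stated in full; the proofs are below) =====
def Claim_equal_convert_array_to_tab : Prop := ∀ (tab_array : List String), Dom_convert_array_to_tab tab_array → Pre_convert_array_to_tab tab_array → Spec_convert_array_to_tab tab_array (convert_array_to_tab tab_array)

-- ===== LEMMAS AND PROOFS =====

-- the per-cell value both programs produce for one (letter, element) pair
def pvCell (letter elem : String) : String :=
  if PySem.Str.isIn letter elem then
    (if (PySem.Int.ofStr? (PySem.Str.slice elem (some 1) none)).getD 0 > 9
      then PySem.Str.slice elem (some 1) none ++ "-"
      else PySem.Str.slice elem (some 1) none ++ "--")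
  else "---"

-- A's inner loop, already converted from index form to a fold over the list
theorem pvA_fold_toList (l : String) (xs : List String) (acc : String) :
    (xs.foldl (fun ts elem =>
      if PySem.Str.isIn l elem then
        ts ++ (if (PySem.Int.ofStr? (PySem.Str.slice elem (some 1) none)).getD 0 > 9
          then PySem.Str.slice elem (some 1) none ++ "-"
          else PySem.Str.slice elem (some 1) none ++ "--")
      else ts ++ "---") acc).toList
    = acc.toList ++ (xs.map (fun e => (pvCell l e).toList)).flatten := by
  induction xs generalizing acc with
  | nil => simp
  | cons x xs ih =>
    simp only [List.foldl_cons, List.map_cons, List.flatten_cons]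
    rw [ih]
    by_cases h : PySem.Chars.isIn l.toList x.toList = true <;> simp [pvCell, h]

-- A's inner loop in its pyRange/pyGetD index form
theorem pvA_row (xs : List String) (l acc : String) :
    (PySem.List.pyRange 0 (PySem.List.len xs) 1).foldl
      (fun ts i =>
        if PySem.Str.isIn l (PySem.List.pyGetD xs i "") then
          ts ++ (if (PySem.Int.ofStr? (PySem.Str.slice (PySem.List.pyGetD xs i "") (some 1) none)).getD 0 > 9
            then PySem.Str.slice (PySem.List.pyGetD xs i "") (some 1) none ++ "-"
            else PySem.Str.slice (PySem.List.pyGetD xs i "") (some 1) none ++ "--")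
        else ts ++ "---") acc
    = acc ++ String.ofList ((xs.map (fun e => (pvCell l e).toList)).flatten) := by
  apply String.toList_inj.mp
  rw [PySem.List.len_eq,
      PySem.List.foldl_pyRange_zero_pyGetD' xs ""
        (fun ts elem =>
          if PySem.Str.isIn l elem then
            ts ++ (if (PySem.Int.ofStr? (PySem.Str.slice elem (some 1) none)).getD 0 > 9
              then PySem.Str.slice elem (some 1) none ++ "-"
              else PySem.Str.slice elem (some 1) none ++ "--")
          else ts ++ "---") acc,
      pvA_fold_toList]
  simp

theorem pvZipWith_map {α β : Type} (f : α → β → β) (letters : List α) (g : α → β) :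
    List.zipWith f letters (letters.map g) = letters.map (fun l => f l (g l)) := by
  induction letters with
  | nil => rfl
  | cons a as ihl => simp [ihl]

-- B's grid pass fills row r with exactly the cells of letter r
theorem pvB_rows (letters : List String) (xs : List String) (g : String → List String) :
    xs.foldl (fun rows elem =>
      List.zipWith (fun letter row =>
        row ++ [if PySem.Str.isIn letter elem then
                  (if (PySem.Int.ofStr? (PySem.Str.slice elem (some 1) none)).getD 0 > 9
                    then PySem.Str.slice elem (some 1) none ++ "-"
                    else PySem.Str.slice elem (some 1) none ++ "--")
                else "---"]) letters rows) (letters.map g)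
    = letters.map (fun l => g l ++ xs.map (pvCell l)) := by
  induction xs generalizing g with
  | nil => simp
  | cons x xs ih =>
    simp only [List.foldl_cons]
    rw [pvZipWith_map]
    rw [ih]
    simp [pvCell]

theorem pvJoin_nil_cons (p : List Char) (cs : List (List Char)) :
    PySem.Chars.join [] (p :: cs) = p ++ PySem.Chars.join [] cs := by
  cases cs <;> simp [PySem.Chars.join_singleton, PySem.Chars.join_cons_cons, PySem.Chars.join_nil]

theorem pvJoin_nil_flatten (cs : List (List Char)) :
    PySem.Chars.join [] cs = cs.flatten := by
  induction cs with
  | nil => simp [PySem.Chars.join_nil]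
  | cons p cs ih => rw [pvJoin_nil_cons, ih, List.flatten_cons]

theorem convert_array_to_tab_eq_alt (xs : List String) :
    convert_array_to_tab xs = convert_array_to_tab_alt xs := by
  unfold convert_array_to_tab convert_array_to_tab_alt
  dsimp only
  rw [pvB_rows]
  simp only [List.foldl_cons, List.foldl_nil]
  rw [pvA_row, pvA_row, pvA_row, pvA_row, pvA_row, pvA_row]
  apply String.toList_inj.mp
  simp [PySem.Str.toList_join, pvJoin_nil_flatten, Function.comp_def]

-- ===== VERDICT (by name: the statement is the Claim_ definition above) =====
theorem convert_array_to_tab_spec : Claim_equal_convert_array_to_tab := by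
  intro xs _ _
  unfold Spec_convert_array_to_tab
  exact convert_array_to_tab_eq_alt xs
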